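-- pv_equiv track=rewrite | github.com/makximkiselev/internal_gorb_bot | handlers/catalog/crud/series.py | move_item_in_dict
-- ===== SOURCE A (Python) =====
-- def move_item_in_dict(d: dict, key: str, direction: str):
--     keys = list(d.keys())
--     if key not in keys:
--         return d
--     idx = keys.index(key)
--     if direction == "up" and idx > 0:
--         keys[idx], keys[idx - 1] = keys[idx - 1], keys[idx]
--     elif direction == "down" and idx < len(keys) - 1:
--         keys[idx], keys[idx + 1] = keys[idx + 1], keys[idx]
--     return {k: d[k] for k in keys}
-- ===== SOURCE B (Python) =====
-- def move_item_in_dict(d: dict, key: str, direction: str):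
--     if key not in d:
--         return d
--     items = list(d.items())
--     if direction == "up":
--         items = _swap_up(items, key)
--     elif direction == "down":
--         items = _swap_up(items[::-1], key)[::-1]
--     return dict(items)
--
--
-- def _swap_up(items, key):
--     # one pass: buffer the previous pair; when the target key arrives, emit it
--     # before the buffered pair (i.e. swap it with its predecessor)
--     out = []
--     prev = None
--     for pair in items:
--         if prev is None:
--             prev = pair
--         elif pair[0] == key:
--             out += [pair, prev]
--             prev = None
--         else:
--             out.append(prev)
--             prev = pair
--     if prev is not None:
--         out.append(prev)
--     return out
-- ===== Notes on version B (the rewrite author's own statement) =====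
-- stated objective: alternative
-- what changed: Replaces A's key-list index lookup, positional swap and rebuild-by-lookup dict comprehension with a single buffered scan over the items that emits the target pair before its buffered predecessor ('down' is handled as reverse, swap-up, reverse).
import Mathlib
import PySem

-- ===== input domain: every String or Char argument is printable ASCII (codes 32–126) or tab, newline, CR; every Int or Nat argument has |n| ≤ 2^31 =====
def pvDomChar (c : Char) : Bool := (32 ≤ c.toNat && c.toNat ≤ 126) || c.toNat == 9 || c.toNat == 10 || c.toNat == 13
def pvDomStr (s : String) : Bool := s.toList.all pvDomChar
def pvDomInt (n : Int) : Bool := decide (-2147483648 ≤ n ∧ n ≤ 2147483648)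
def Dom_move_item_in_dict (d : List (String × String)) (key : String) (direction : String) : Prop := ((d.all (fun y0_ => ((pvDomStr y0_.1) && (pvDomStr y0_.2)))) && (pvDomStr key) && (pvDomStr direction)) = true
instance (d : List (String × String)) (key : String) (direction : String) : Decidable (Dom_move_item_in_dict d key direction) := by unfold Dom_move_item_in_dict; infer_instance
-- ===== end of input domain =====

-- B replaces A's index-lookup + positional swap on the key list + rebuild-by-lookup with a
-- single buffered scan over the items ('down' = reverse, swap-up, reverse); objective: alternative.
-- Python A mutates nothing; in the key-absent case both return a dict equal to the input
-- (A returns the same object, B too via its early guard) — return-value equivalence is what is proved.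

-- ===== PORT A =====
def move_item_in_dict (d : List (String × String)) (key : String) (direction : String) : List (String × String) :=
  let dd := PySem.Dict.ofList d          -- the dict parameter
  let keys := dd.keys
  if key ∉ keys then dd.items            -- 'return d'
  else
    let idx := (PySem.List.index? keys key).getD 0   -- keys.index(key); key ∈ keys so index? = some _
    let keys' :=
      if direction = "up" ∧ idx > 0 then
        -- keys[idx], keys[idx-1] = keys[idx-1], keys[idx]; indices in range, so getD "" is exact
        (keys.set idx (keys.getD (idx - 1) "")).set (idx - 1) (keys.getD idx "")
      else if direction = "down" ∧ idx < keys.length - 1 then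
        (keys.set idx (keys.getD (idx + 1) "")).set (idx + 1) (keys.getD idx "")
      else keys
    -- {k: d[k] for k in keys}; every k ∈ keys' is a key of dd, so getD "" is exact
    (keys'.foldl (fun acc k => acc.insert k (dd.getD k "")) PySem.Dict.empty).items

-- ===== PORT B =====
-- the for-loop of _swap_up: state (out, prev) carried through the items
def pv_swap_up_go (key : String) (out : List (String × String)) (prev : Option (String × String)) : List (String × String) → List (String × String)
  | [] =>
    match prev with
    | none => out
    | some p => out ++ [p]
  | pair :: rest =>
    match prev with
    | none => pv_swap_up_go key out (some pair) rest
    | some p =>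
      if pair.1 = key then pv_swap_up_go key (out ++ [pair, p]) none rest
      else pv_swap_up_go key (out ++ [p]) (some pair) rest

def pv_swap_up (items : List (String × String)) (key : String) : List (String × String) :=
  pv_swap_up_go key [] none items

def move_item_in_dict_alt (d : List (String × String)) (key : String) (direction : String) : List (String × String) :=
  let dd := PySem.Dict.ofList d
  if ¬ dd.contains key then dd.items     -- 'return d'
  else
    let items := dd.items
    let items' :=
      if direction = "up" then pv_swap_up items key
      else if direction = "down" then (pv_swap_up items.reverse key).reverse
      else items
    (PySem.Dict.ofList items').items     -- 'return dict(items)'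

-- ===== PRECONDITION & SPEC =====
def Spec_move_item_in_dict (d : List (String × String)) (key : String) (direction : String) (out : List (String × String)) : Prop := out = move_item_in_dict_alt d key direction
instance (d : List (String × String)) (key : String) (direction : String) (out : List (String × String)) : Decidable (Spec_move_item_in_dict d key direction out) := by unfold Spec_move_item_in_dict; infer_instance

-- ===== CLAIM (what is proved, stated in full; the proofs are below) =====
def Claim_equal_move_item_in_dict : Prop := ∀ (d : List (String × String)) (key : String) (direction : String), Dom_move_item_in_dict d key direction → Spec_move_item_in_dict d key direction (move_item_in_dict d key direction)

-- ===== LEMMAS AND PROOFS =====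

-- ofList is the identity on association lists whose keys are already distinct
theorem pv_ofList_items_of_nodup (l : List (String × String)) (h : (l.map (·.1)).Nodup) :
    (PySem.Dict.ofList l).items = l := by
  have hfresh : ∀ a ∈ l, (PySem.Dict.empty : PySem.Dict String String).contains a.1 = false :=
    fun a _ => PySem.Dict.contains_empty _
  have h2 := PySem.Dict.items_foldl_insert_fresh l (fun p => p.1) (fun p => p.2)
    PySem.Dict.empty hfresh (by simpa using h)
  refine Eq.trans ?_ (Eq.trans h2 ?_)
  · rfl
  · have he : (PySem.Dict.empty : PySem.Dict String String).items = [] := rfl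
    rw [he, List.nil_append]
    simp

-- rebuilding by lookup returns the pairs themselves
theorem pv_mapback (dd : PySem.Dict String String) (hnd : dd.keys.Nodup)
    (li' : List (String × String)) (hm : ∀ p ∈ li', p ∈ dd.items)
    (hnd' : (li'.map (·.1)).Nodup) :
    ((li'.map (·.1)).foldl (fun acc k => acc.insert k (dd.getD k "")) PySem.Dict.empty).items = li' := by
  have hfresh : ∀ a ∈ li'.map (·.1), (PySem.Dict.empty : PySem.Dict String String).contains a = false :=
    fun a _ => PySem.Dict.contains_empty _
  have h := PySem.Dict.items_foldl_insert_fresh (li'.map (·.1)) (fun x => x)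
    (fun k => dd.getD k "") PySem.Dict.empty hfresh (by simpa using hnd')
  refine Eq.trans h ?_
  have he : (PySem.Dict.empty : PySem.Dict String String).items = [] := rfl
  rw [he, List.nil_append, List.map_map]
  have hpt : ∀ x ∈ li', ((fun a => (a, dd.getD a "")) ∘ (·.1)) x = id x := by
    rintro ⟨k, v⟩ hx
    have hg := PySem.Dict.getD_of_mem_items dd (hm _ hx) hnd ""
    simp [Function.comp, hg]
  rw [List.map_congr_left hpt, List.map_id]

-- decomposition of an association list at its first occurrence of key
theorem pv_decomp (key : String) :
    ∀ (l : List (String × String)), key ∈ l.map (·.1) →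
      ∃ L p R, l = L ++ p :: R ∧ p.1 = key ∧ key ∉ L.map (·.1) := by
  intro l
  induction l with
  | nil => intro h; simp at h
  | cons x t ih =>
    intro h
    by_cases hx : x.1 = key
    · exact ⟨[], x, t, by simp, hx, by simp⟩
    · have ht : key ∈ t.map (·.1) := by
        simp only [List.map_cons, List.mem_cons] at h
        rcases h with h | h
        · exact absurd h.symm hx
        · exact h
      obtain ⟨L, p, R, h1, h2, h3⟩ := ih ht
      refine ⟨x :: L, p, R, by simp [h1], h2, ?_⟩
      simp only [List.map_cons, List.mem_cons]
      push_neg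
      exact ⟨fun hc => hx hc.symm, h3⟩

-- the parallel assignment keys[hi], keys[lo] = keys[lo], keys[hi] at adjacent lo = M.length
theorem pv_swap_set (M : List String) (a b : String) (X : List String) :
    (((M ++ a :: b :: X).set (M.length + 1) ((M ++ a :: b :: X).getD M.length "")).set
      M.length ((M ++ a :: b :: X).getD (M.length + 1) "")) = M ++ b :: a :: X := by
  induction M with
  | nil => simp
  | cons m M ih =>
    simp only [List.cons_append, List.length_cons, List.getD_cons_succ, List.set_cons_succ]
    rw [ih]

theorem pv_swap_set' (M : List String) (a b : String) (X : List String) :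
    (((M ++ a :: b :: X).set M.length ((M ++ a :: b :: X).getD (M.length + 1) "")).set
      (M.length + 1) ((M ++ a :: b :: X).getD M.length "")) = M ++ b :: a :: X := by
  induction M with
  | nil => simp
  | cons m M ih =>
    simp only [List.cons_append, List.length_cons, List.getD_cons_succ, List.set_cons_succ]
    rw [ih]

theorem pv_index_at (key : String) (M X : List String) (h : key ∉ M) :
    (PySem.List.index? (M ++ key :: X) key).getD 0 = M.length := by
  have hs : PySem.List.index? (M ++ key :: X) key = some M.length :=
    (PySem.List.index?_eq_some_iff _ _ _).mpr ⟨M, X, rfl, rfl, h⟩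
  rw [hs]; rfl

-- B-side loop lemmas
theorem pv_go_some (key : String) :
    ∀ (l out : List (String × String)) (p : String × String),
      key ∉ l.map (·.1) → pv_swap_up_go key out (some p) l = out ++ p :: l := by
  intro l
  induction l with
  | nil => intro out p _; rfl
  | cons x t ih =>
    intro out p h
    simp only [List.map_cons, List.mem_cons] at h
    push_neg at h
    have hx : ¬ x.1 = key := fun hc => h.1 hc.symm
    simp only [pv_swap_up_go, hx, if_false]
    rw [ih (out ++ [p]) x h.2]
    simp

theorem pv_go_none (key : String) (l out : List (String × String)) (h : key ∉ l.map (·.1)) :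
    pv_swap_up_go key out none l = out ++ l := by
  cases l with
  | nil => simp [pv_swap_up_go]
  | cons x t =>
    have ht : key ∉ t.map (·.1) := by
      simp only [List.map_cons, List.mem_cons] at h; push_neg at h; exact h.2
    simp only [pv_swap_up_go]
    rw [pv_go_some key t out x ht]

theorem pv_go_shift (key : String) (b : String × String) (X : List (String × String))
    (hb : b.1 = key) (hX : key ∉ X.map (·.1)) :
    ∀ (M out : List (String × String)) (p a : String × String),
      key ∉ (p :: M).map (·.1) → a.1 ≠ key →
      pv_swap_up_go key out (some p) (M ++ a :: b :: X) = out ++ p :: M ++ b :: a :: X := by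
  intro M
  induction M with
  | nil =>
    intro out p a _ ha
    simp only [List.nil_append, pv_swap_up_go, ha, if_false, hb, if_true]
    rw [pv_go_none key X (out ++ [p] ++ [b, a]) hX]
    simp
  | cons m M ih =>
    intro out p a h ha
    simp only [List.map_cons, List.mem_cons] at h
    push_neg at h
    have hm1 : ¬ m.1 = key := fun hc => h.2.1 hc.symm
    have hM : key ∉ (m :: M).map (·.1) := by
      simp only [List.map_cons, List.mem_cons]
      push_neg
      exact ⟨fun hc => hm1 hc.symm, h.2.2⟩
    simp only [List.cons_append, pv_swap_up_go, hm1, if_false]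
    rw [ih (out ++ [p]) m a hM ha]
    simp

-- full up-swap: the target pair moves before its predecessor
theorem pv_swap_up_main (key : String) (L' : List (String × String)) (q p : String × String)
    (R : List (String × String)) (hL : key ∉ (L' ++ [q]).map (·.1)) (hp : p.1 = key)
    (hR : key ∉ R.map (·.1)) :
    pv_swap_up (L' ++ q :: p :: R) key = L' ++ p :: q :: R := by
  cases L' with
  | nil =>
    have hq : ¬ q.1 = key := by
      simp only [List.nil_append, List.map_cons, List.map_nil, List.mem_cons,
        List.not_mem_nil, or_false] at hL
      exact fun hc => hL hc.symm
    simp only [List.nil_append]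
    show pv_swap_up_go key [] none (q :: p :: R) = p :: q :: R
    have s1 : pv_swap_up_go key [] none (q :: p :: R)
        = pv_swap_up_go key [] (some q) (p :: R) := rfl
    rw [s1]
    have s2 : pv_swap_up_go key [] (some q) (p :: R)
        = pv_swap_up_go key ([] ++ [p, q]) none R := by
      simp [pv_swap_up_go, hp]
    rw [s2, pv_go_none key R _ hR]
    simp
  | cons x L'' =>
    have hin : key ∉ (x :: L'').map (·.1) := fun hc =>
      hL (by simp only [List.map_append, List.mem_append]; exact Or.inl hc)
    have hq : q.1 ≠ key := by
      simp only [List.map_append, List.map_cons, List.map_nil, List.mem_append,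
        List.mem_cons, List.not_mem_nil, or_false] at hL
      push_neg at hL
      exact fun hc => hL.2 hc.symm
    show pv_swap_up_go key [] none ((x :: L'') ++ q :: p :: R) = (x :: L'') ++ p :: q :: R
    have s1 : pv_swap_up_go key [] none ((x :: L'') ++ q :: p :: R)
        = pv_swap_up_go key [] (some x) (L'' ++ q :: p :: R) := rfl
    rw [s1, pv_go_shift key p R hp hR L'' [] x q hin hq]
    simp

theorem pv_swap_up_head (key : String) (p : String × String) (R : List (String × String))
    (hp : p.1 = key) (hR : key ∉ R.map (·.1)) :
    pv_swap_up (p :: R) key = p :: R := by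
  show pv_swap_up_go key [] none (p :: R) = p :: R
  have s1 : pv_swap_up_go key [] none (p :: R) = pv_swap_up_go key [] (some p) R := rfl
  rw [s1, pv_go_some key R [] p hR]
  simp

-- a swap of two adjacent pairs keeps the key list duplicate-free
theorem pv_nodup_swap (A : List (String × String)) (x y : String × String)
    (B : List (String × String)) (h : ((A ++ x :: y :: B).map (·.1)).Nodup) :
    ((A ++ y :: x :: B).map (·.1)).Nodup := by
  have hperm : (A ++ x :: y :: B).Perm (A ++ y :: x :: B) :=
    List.Perm.append_left A (List.Perm.swap y x B)
  exact (hperm.map (·.1)).nodup h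

theorem pv_main (d : List (String × String)) (key : String) (direction : String) :
    move_item_in_dict d key direction = move_item_in_dict_alt d key direction := by
  unfold move_item_in_dict move_item_in_dict_alt
  dsimp only
  set dd := PySem.Dict.ofList d with hdd
  have hnd : dd.keys.Nodup := PySem.Dict.nodup_keys_ofList d
  have hkeys : dd.keys = dd.items.map (·.1) := rfl
  have hnd' : (dd.items.map (·.1)).Nodup := hnd
  by_cases hk : key ∈ dd.keys
  swap
  · -- key absent: both return the input dict
    rw [if_pos hk, if_pos (fun hc => hk ((PySem.Dict.contains_iff_mem_keys dd key).mp hc))]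
  · rw [if_neg (not_not_intro hk),
      if_neg (not_not_intro ((PySem.Dict.contains_iff_mem_keys dd key).mpr hk))]
    obtain ⟨L, p, R, hdec, hpk, hLk⟩ := pv_decomp key dd.items (hkeys ▸ hk)
    have hndf : ((L ++ p :: R).map (·.1)).Nodup := by rw [← hdec]; exact hnd'
    have hRk : key ∉ R.map (·.1) := by
      have h2 : ((p :: R).map (·.1)).Nodup := by
        have h3 := hndf
        rw [List.map_append] at h3
        exact h3.of_append_right
      rw [List.map_cons, List.nodup_cons, hpk] at h2
      exact h2.1
    have hkey2 : dd.keys = L.map (·.1) ++ key :: R.map (·.1) := by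
      rw [hkeys, hdec]; simp [hpk]
    have hidx : (PySem.List.index? dd.keys key).getD 0 = L.length := by
      rw [hkey2]
      have h4 := pv_index_at key (L.map (·.1)) (R.map (·.1)) hLk
      simpa using h4
    rw [hidx]
    by_cases hup : direction = "up"
    · rcases List.eq_nil_or_concat L with hL0 | ⟨L', q, hL⟩
      · -- key already first: no swap
        subst hL0
        rw [if_neg (by rintro ⟨-, hc⟩; simp at hc)]
        rw [if_neg (by rintro ⟨hc, -⟩; rw [hup] at hc; exact absurd hc (by decide))]
        rw [hkeys, pv_mapback dd hnd dd.items (fun _ h => h) hnd']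
        rw [if_pos hup]
        have hd1 : dd.items = p :: R := by simpa using hdec
        have hBi : pv_swap_up dd.items key = dd.items := by
          rw [hd1]; exact pv_swap_up_head key p R hpk hRk
        rw [hBi, pv_ofList_items_of_nodup _ hnd']
      · -- swap with the previous key
        have hqk : key ∉ (L' ++ [q]).map (·.1) := by
          rw [List.concat_eq_append] at hL
          rw [← hL]; exact hLk
        have hLlen : L.length = L'.length + 1 := by rw [hL]; simp
        rw [hLlen]
        rw [if_pos ⟨hup, by omega⟩]
        simp only [Nat.add_sub_cancel]
        have hml : L'.length = (L'.map (·.1 : String × String → String)).length := by simp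
        rw [hml]
        have e1 : dd.keys = L'.map (·.1) ++ q.1 :: key :: R.map (·.1) := by
          rw [hkeys, hdec, hL]; simp [hpk]
        rw [e1, pv_swap_set (L'.map (·.1)) q.1 key (R.map (·.1))]
        have hitems : dd.items = L' ++ q :: p :: R := by
          rw [hdec, hL]; simp
        have hndX : ((L' ++ q :: p :: R).map (·.1)).Nodup := by
          rw [← hitems]; exact hnd'
        have hswapnodup : ((L' ++ p :: q :: R).map (·.1)).Nodup :=
          pv_nodup_swap L' q p R hndX
        have hmem : ∀ x ∈ L' ++ p :: q :: R, x ∈ dd.items := by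
          intro x hx
          rw [hitems]
          simp only [List.mem_append, List.mem_cons] at hx ⊢
          tauto
        have e3 : L'.map (·.1) ++ key :: q.1 :: R.map (·.1) = (L' ++ p :: q :: R).map (·.1) := by
          simp [hpk]
        rw [e3, pv_mapback dd hnd _ hmem hswapnodup]
        rw [if_pos hup]
        have hBi : pv_swap_up dd.items key = L' ++ p :: q :: R := by
          rw [hitems]; exact pv_swap_up_main key L' q p R hqk hpk hRk
        rw [hBi, pv_ofList_items_of_nodup _ hswapnodup]
    · by_cases hdn : direction = "down"
      · cases R with
        | nil =>
          -- key already last: no swap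
          have hklen : dd.keys.length = L.length + 1 := by rw [hkey2]; simp
          rw [if_neg (by rintro ⟨hc, -⟩; exact hup hc)]
          rw [if_neg (by rintro ⟨-, hc⟩; omega)]
          rw [hkeys, pv_mapback dd hnd dd.items (fun _ h => h) hnd']
          rw [if_neg hup, if_pos hdn]
          have hd1 : dd.items = L ++ [p] := hdec
          have hrev : dd.items.reverse = p :: L.reverse := by rw [hd1]; simp
          have hLrev : key ∉ (L.reverse.map (·.1)) := by
            simp only [List.map_reverse, List.mem_reverse]
            simpa using hLk
          have hBi : (pv_swap_up dd.items.reverse key).reverse = dd.items := by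
            rw [hrev, pv_swap_up_head key p L.reverse hpk hLrev, hd1]
            simp
          rw [hBi, pv_ofList_items_of_nodup _ hnd']
        | cons r R' =>
          -- swap with the next key
          have hklen : dd.keys.length = L.length + R'.length + 2 := by
            rw [hkey2]; simp; omega
          rw [if_neg (by rintro ⟨hc, -⟩; exact hup hc)]
          rw [if_pos ⟨hdn, by omega⟩]
          have hml : L.length = (L.map (·.1 : String × String → String)).length := by simp
          rw [hml]
          have e1 : dd.keys = L.map (·.1) ++ key :: r.1 :: R'.map (·.1) := by
            rw [hkey2]; simp
          rw [e1, pv_swap_set' (L.map (·.1)) key r.1 (R'.map (·.1))]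
          have hndX : ((L ++ p :: r :: R').map (·.1)).Nodup := by
            rw [← hdec]; exact hnd'
          have hswapnodup : ((L ++ r :: p :: R').map (·.1)).Nodup :=
            pv_nodup_swap L p r R' hndX
          have hmem : ∀ x ∈ L ++ r :: p :: R', x ∈ dd.items := by
            intro x hx
            rw [hdec]
            simp only [List.mem_append, List.mem_cons] at hx ⊢
            tauto
          have e3 : L.map (·.1) ++ r.1 :: key :: R'.map (·.1) = (L ++ r :: p :: R').map (·.1) := by
            simp [hpk]
          rw [e3, pv_mapback dd hnd _ hmem hswapnodup]
          rw [if_neg hup, if_pos hdn]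
          have hrk : key ≠ r.1 := by
            simp only [List.map_cons, List.mem_cons] at hRk
            push_neg at hRk
            exact hRk.1
          have hR'k : key ∉ R'.map (·.1) := by
            simp only [List.map_cons, List.mem_cons] at hRk
            push_neg at hRk
            exact hRk.2
          have hrev : dd.items.reverse = R'.reverse ++ r :: p :: L.reverse := by
            rw [hdec]; simp
          have c1 : key ∉ (R'.reverse ++ [r]).map (·.1) := by
            simp only [List.map_append, List.map_reverse, List.map_cons, List.map_nil,
              List.mem_append, List.mem_reverse, List.mem_cons, List.not_mem_nil, or_false]
            push_neg
            exact ⟨by simpa using hR'k, hrk⟩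
          have c2 : key ∉ (L.reverse.map (·.1)) := by
            simp only [List.map_reverse, List.mem_reverse]
            simpa using hLk
          have hBi : (pv_swap_up dd.items.reverse key).reverse = L ++ r :: p :: R' := by
            rw [hrev, pv_swap_up_main key R'.reverse r p L.reverse c1 hpk c2]
            simp
          rw [hBi, pv_ofList_items_of_nodup _ hswapnodup]
      · -- neither "up" nor "down": no swap
        rw [if_neg (by rintro ⟨hc, -⟩; exact hup hc),
          if_neg (by rintro ⟨hc, -⟩; exact hdn hc)]
        rw [hkeys, pv_mapback dd hnd dd.items (fun _ h => h) hnd']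
        rw [if_neg hup, if_neg hdn, pv_ofList_items_of_nodup _ hnd']

-- ===== VERDICT (by name: the statement is the Claim_ definition above) =====
theorem move_item_in_dict_spec : Claim_equal_move_item_in_dict := by
  intro d key direction _
  unfold Spec_move_item_in_dict
  exact pv_main d key direction
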